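-- pv_equiv track=rewrite | github.com/marcosfrancesquini/planilhas | orquestrador_lp.py | parse_lista_numeros
-- ===== SOURCE A (Python) =====
-- from typing import List, Tuple, Dict, Optional, Any
--
-- def parse_lista_numeros(txt: str) -> List[int]:
--     if not txt.strip():
--         return []
--     itens = []
--     for p in txt.replace(',', ' ').split():
--         try:
--             n = int(p)
--         except ValueError:
--             continue
--         if 0 <= n <= 99:
--             itens.append(n)
--     return sorted(set(itens))
-- ===== SOURCE B (Python) =====
-- def _to_int(p):
--     try:
--         return int(p)
--     except ValueError:
--         return None
--
-- def parse_lista_numeros(txt):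
--     if not txt.strip():
--         return []
--     toks = txt.replace(',', ' ').split()
--     return [i for i in range(100) if any(_to_int(p) == i for p in toks)]
-- ===== Notes on version B (the rewrite author's own statement) =====
-- stated objective: alternative
-- what changed: Replaces A's accumulate-then-sorted(set(...)) pipeline with a candidate scan: for each i in 0..99 keep i iff some token parses to i, so there is no accumulator list, no set and no sort.
import Mathlib
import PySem

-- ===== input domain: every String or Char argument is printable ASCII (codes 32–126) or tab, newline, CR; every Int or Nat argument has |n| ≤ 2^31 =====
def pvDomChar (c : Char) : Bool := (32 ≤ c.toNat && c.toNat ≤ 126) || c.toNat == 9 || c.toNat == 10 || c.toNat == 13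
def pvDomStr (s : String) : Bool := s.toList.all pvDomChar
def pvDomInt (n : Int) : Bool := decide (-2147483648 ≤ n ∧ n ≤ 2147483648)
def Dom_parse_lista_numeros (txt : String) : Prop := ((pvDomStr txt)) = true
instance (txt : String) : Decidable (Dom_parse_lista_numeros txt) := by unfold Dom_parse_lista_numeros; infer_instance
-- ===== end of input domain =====

-- B drops A's accumulate-then-sorted(set(...)) pipeline for a candidate scan over 0..99
-- (keep i iff some token parses to i); same guard and tokenisation, same return value.

-- ===== PORT A =====
-- step of A's loop body (try int(p); skip on ValueError; append if 0 <= n <= 99)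
def pvStepA (acc : List Int) (p : String) : List Int :=
  match PySem.Int.ofStr? p with
  | none => acc
  | some n => if 0 ≤ n ∧ n ≤ 99 then acc ++ [n] else acc

def parse_lista_numeros (txt : String) : List Int :=
  if PySem.Str.strip txt = "" then []
  else
    let itens := (PySem.Str.split₀ (PySem.Str.replace txt "," " ")).foldl pvStepA []
    PySem.List.sorted (PySem.Set.ofList itens) (fun x => x) false

-- ===== PORT B =====
-- _to_int(p): int(p) or None on ValueError
def pvToInt (p : String) : Option Int := PySem.Int.ofStr? p

def parse_lista_numeros_alt (txt : String) : List Int :=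
  if PySem.Str.strip txt = "" then []
  else
    let toks := PySem.Str.split₀ (PySem.Str.replace txt "," " ")
    (PySem.List.pyRange 0 100 1).filter (fun i => toks.any (fun p => pvToInt p == some i))

-- ===== PRECONDITION & SPEC =====
def Spec_parse_lista_numeros (txt : String) (out : List Int) : Prop := out = parse_lista_numeros_alt txt
instance (txt : String) (out : List Int) : Decidable (Spec_parse_lista_numeros txt out) := by unfold Spec_parse_lista_numeros; infer_instance

-- ===== CLAIM (what is proved, stated in full; the proofs are below) =====
def Claim_equal_parse_lista_numeros : Prop := ∀ (txt : String), Dom_parse_lista_numeros txt → Spec_parse_lista_numeros txt (parse_lista_numeros txt)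

-- ===== LEMMAS AND PROOFS =====

-- Membership in A's accumulated list: n is collected iff it was already in acc or some
-- token parses to n and n lies in [0, 99].
theorem pv_mem_foldl (toks : List String) (acc : List Int) (n : Int) :
    n ∈ toks.foldl pvStepA acc ↔
      n ∈ acc ∨ ∃ p ∈ toks, PySem.Int.ofStr? p = some n ∧ 0 ≤ n ∧ n ≤ 99 := by
  induction toks generalizing acc with
  | nil => simp
  | cons p toks ih =>
    simp only [List.foldl_cons]
    cases hp : PySem.Int.ofStr? p with
    | none =>
      simp only [pvStepA, hp, ih]
      constructor
      · rintro (h | h)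
        · exact Or.inl h
        · exact Or.inr ⟨h.choose, List.mem_cons_of_mem _ h.choose_spec.1, h.choose_spec.2⟩
      · rintro (h | ⟨q, hq, hqn, hn⟩)
        · exact Or.inl h
        · rcases List.mem_cons.1 hq with rfl | hq'
          · rw [hp] at hqn; cases hqn
          · exact Or.inr ⟨q, hq', hqn, hn⟩
    | some m =>
      simp only [pvStepA, hp]
      by_cases hm : 0 ≤ m ∧ m ≤ 99
      · rw [if_pos hm, ih]
        constructor
        · rintro (h | h)
          · rcases List.mem_append.1 h with h' | h'
            · exact Or.inl h'
            · simp at h'; subst h'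
              exact Or.inr ⟨p, List.mem_cons_self, hp, hm⟩
          · exact Or.inr ⟨h.choose, List.mem_cons_of_mem _ h.choose_spec.1, h.choose_spec.2⟩
        · rintro (h | ⟨q, hq, hqn, hn⟩)
          · exact Or.inl (List.mem_append.2 (Or.inl h))
          · rcases List.mem_cons.1 hq with rfl | hq'
            · rw [hp] at hqn; injection hqn with hnm; subst hnm
              exact Or.inl (by simp)
            · exact Or.inr ⟨q, hq', hqn, hn⟩
      · rw [if_neg hm, ih]
        constructor
        · rintro (h | h)
          · exact Or.inl h
          · exact Or.inr ⟨h.choose, List.mem_cons_of_mem _ h.choose_spec.1, h.choose_spec.2⟩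
        · rintro (h | ⟨q, hq, hqn, hn⟩)
          · exact Or.inl h
          · rcases List.mem_cons.1 hq with rfl | hq'
            · rw [hp] at hqn; injection hqn with hnm; subst hnm; exact absurd hn hm
            · exact Or.inr ⟨q, hq', hqn, hn⟩

-- sorted(set(acc)) for a list of values in [0,99] is the 0..99 scan of membership.
theorem pv_sorted_eq (acc : List Int) (hrange : ∀ n ∈ acc, 0 ≤ n ∧ n ≤ 99) :
    PySem.List.sorted (PySem.Set.ofList acc) (fun x => x) false
      = (PySem.List.pyRange 0 100 1).filter (fun i => decide (i ∈ acc)) := by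
  apply PySem.List.sorted_eq_of_perm_of_pairwise_lt
  · apply (List.perm_ext_iff_of_nodup ?_ ?_).2
    · intro a
      simp only [List.mem_filter, PySem.List.mem_pyRange_one, PySem.Set.mem_ofList,
        decide_eq_true_eq]
      constructor
      · rintro ⟨⟨_, _⟩, h⟩; exact h
      · intro h; exact ⟨⟨(hrange a h).1, by have := (hrange a h).2; omega⟩, h⟩
    · exact (PySem.List.nodup_pyRange_one 0 100).filter _
    · exact PySem.Set.nodup_ofList acc
  · exact (PySem.List.pairwise_lt_pyRange_one 0 100).filter _

-- ===== VERDICT (by name: the statement is the Claim_ definition above) =====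
theorem parse_lista_numeros_spec : Claim_equal_parse_lista_numeros := by
  intro txt _
  unfold Spec_parse_lista_numeros parse_lista_numeros parse_lista_numeros_alt
  by_cases h : PySem.Str.strip txt = ""
  · simp [h]
  · simp only [if_neg h]
    set toks := PySem.Str.split₀ (PySem.Str.replace txt "," " ") with htoks
    have hrange : ∀ n ∈ toks.foldl pvStepA [], 0 ≤ n ∧ n ≤ 99 := by
      intro n hn
      rcases (pv_mem_foldl toks [] n).1 hn with h' | ⟨_, _, _, h'⟩
      · cases h'
      · exact h'
    rw [pv_sorted_eq _ hrange]
    apply List.filter_congr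
    intro i hi
    rw [PySem.List.mem_pyRange_one] at hi
    rw [Bool.eq_iff_iff, decide_eq_true_iff, List.any_eq_true, pv_mem_foldl]
    simp only [List.mem_nil_iff, false_or, pvToInt, beq_iff_eq]
    constructor
    · rintro ⟨p, hp, hpn, _⟩
      exact ⟨p, hp, hpn⟩
    · rintro ⟨p, hp, hpn⟩
      exact ⟨p, hp, hpn, hi.1, by omega⟩
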